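-- pv_equiv track=rewrite | github.com/Lucas12j/Web_Scraping_Fundamentus | fundamentus_api.py | corrigir
-- ===== SOURCE A (Python) =====
-- def corrigir(n):
--     valor = ""
--     check = False
--     for i in n:
--         if i == ">":
--             check = True
--         if check == True:
--             valor = valor + i
--     return valor
-- ===== SOURCE B (Python) =====
-- def corrigir(n):
--     i = n.find(">")
--     return "" if i == -1 else n[i:]
-- ===== Notes on version B (the rewrite author's own statement) =====
-- stated objective: faster
-- what changed: Replaces the flag-guarded per-character accumulation loop (quadratic string concatenation) with a single substring search for the marker followed by one slice, returning the empty string when the marker is absent.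
import Mathlib
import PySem

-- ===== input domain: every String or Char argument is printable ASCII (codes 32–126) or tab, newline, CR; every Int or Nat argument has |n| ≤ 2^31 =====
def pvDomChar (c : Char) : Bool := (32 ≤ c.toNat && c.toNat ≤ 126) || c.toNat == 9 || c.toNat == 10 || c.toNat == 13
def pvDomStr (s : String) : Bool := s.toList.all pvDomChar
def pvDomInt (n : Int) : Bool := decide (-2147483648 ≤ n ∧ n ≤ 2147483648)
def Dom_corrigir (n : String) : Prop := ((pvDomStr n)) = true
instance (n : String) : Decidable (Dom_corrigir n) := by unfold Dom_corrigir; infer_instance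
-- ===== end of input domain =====

-- B replaces A's flag-guarded accumulation loop by find('>') + slice; return value only, no side effects.

-- ===== PORT A =====
-- loop body: 'if i == ">": check = True' then 'if check: valor = valor + i'
def corrigirStep (st : List Char × Bool) (i : Char) : List Char × Bool :=
  let check := if i = '>' then true else st.2
  let valor := if check then st.1 ++ [i] else st.1
  (valor, check)

def corrigir (n : String) : String :=
  String.ofList (n.toList.foldl corrigirStep ([], false)).1

-- ===== PORT B =====
def corrigir_alt (n : String) : String :=
  let i := PySem.Str.find n ">"
  if i = -1 then "" else PySem.Str.slice n (some i) none

-- ===== PRECONDITION & SPEC =====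
def Spec_corrigir (n : String) (out : String) : Prop := out = corrigir_alt n
instance (n : String) (out : String) : Decidable (Spec_corrigir n out) := by unfold Spec_corrigir; infer_instance

-- ===== CLAIM (what is proved, stated in full; the proofs are below) =====
def Claim_equal_corrigir : Prop := ∀ (n : String), Dom_corrigir n → Spec_corrigir n (corrigir n)

-- ===== LEMMAS AND PROOFS =====

lemma foldl_step_true (l : List Char) (v : List Char) :
    l.foldl corrigirStep (v, true) = (v ++ l, true) := by
  induction l generalizing v with
  | nil => simp
  | cons c t ih => simp [corrigirStep, ih]

lemma foldl_step_false_not_mem (l : List Char) (v : List Char) (h : '>' ∉ l) :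
    l.foldl corrigirStep (v, false) = (v, false) := by
  induction l generalizing v with
  | nil => simp
  | cons c t ih =>
    simp only [List.mem_cons, not_or] at h
    have hc : c ≠ '>' := fun e => h.1 e.symm
    simp [corrigirStep, hc, ih _ h.2]

lemma foldl_step_false_mem (l : List Char) (v : List Char) (h : '>' ∈ l) :
    l.foldl corrigirStep (v, false) = (v ++ l.dropWhile (fun c => c != '>'), true) := by
  induction l generalizing v with
  | nil => simp at h
  | cons c t ih =>
    by_cases hc : c = '>'
    · subst hc
      simp [corrigirStep, foldl_step_true]
    · have ht : '>' ∈ t := by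
        rcases List.mem_cons.mp h with h1 | h1
        · exact absurd h1.symm hc
        · exact h1
      simp [corrigirStep, hc, ih _ ht]

lemma singleton_prefix_iff (c : Char) (l : List Char) :
    [c] <+: l ↔ ∃ t, l = c :: t := by
  constructor
  · rintro ⟨t, rfl⟩; exact ⟨t, rfl⟩
  · rintro ⟨t, rfl⟩; exact ⟨t, rfl⟩

lemma singleton_infix_iff_mem (c : Char) (l : List Char) :
    [c] <:+: l ↔ c ∈ l := by
  constructor
  · intro h; exact h.mem (by simp)
  · intro h
    rcases List.mem_iff_append.mp h with ⟨s, t, rfl⟩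
    exact ⟨s, t, by simp⟩

lemma dropWhile_eq_drop_of_first (l : List Char) (j : ℕ)
    (hp : ['>'] <+: l.drop j)
    (hmin : ∀ i, i < j → ¬ ['>'] <+: l.drop i) :
    l.dropWhile (fun c => c != '>') = l.drop j := by
  induction l generalizing j with
  | nil =>
    rcases (singleton_prefix_iff _ _).mp hp with ⟨t, ht⟩
    simp at ht
  | cons c t ih =>
    cases j with
    | zero =>
      rcases (singleton_prefix_iff _ _).mp hp with ⟨u, hu⟩
      simp only [List.drop_zero] at hu
      cases hu
      simp [List.dropWhile]
    | succ k =>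
      have hc : c ≠ '>' := by
        intro hc
        exact hmin 0 (Nat.succ_pos k) ((singleton_prefix_iff _ _).mpr ⟨t, by rw [hc]; simp⟩)
      have : t.dropWhile (fun c => c != '>') = t.drop k := by
        apply ih k
        · simpa using hp
        · intro i hi
          simpa using hmin (i + 1) (by omega)
      simp [hc, this]
-- ===== VERDICT (by name: the statement is the Claim_ definition above) =====
theorem corrigir_spec : Claim_equal_corrigir := by
  intro n _
  unfold Spec_corrigir corrigir corrigir_alt
  simp only [PySem.Str.find_eq]
  rw [show (">".toList : List Char) = ['>'] from rfl]
  by_cases h : '>' ∈ n.toList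
  · have hin : (['>'] : List Char) <:+: n.toList := (singleton_infix_iff_mem _ _).mpr h
    have hne : PySem.Chars.find n.toList ['>'] ≠ -1 := by
      rw [PySem.Chars.find_ne_neg_one_iff]; exact hin
    have hpos : 0 ≤ PySem.Chars.find n.toList ['>'] := by
      rw [PySem.Chars.find_nonneg_iff]; exact hin
    obtain ⟨hpre, hmin⟩ := PySem.Chars.find_spec (s := n.toList) (sub := ['>']) hpos
    rw [foldl_step_false_mem _ _ h]
    have hdrop := dropWhile_eq_drop_of_first n.toList (PySem.Chars.find n.toList ['>']).toNat hpre hmin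
    rw [if_neg hne]
    simp [PySem.Str.slice, hdrop, PySem.List.slice_from _ hpos]
  · have hne : PySem.Chars.find n.toList ['>'] = -1 := by
      rw [PySem.Chars.find_eq_neg_one_iff, singleton_infix_iff_mem]
      exact h
    rw [foldl_step_false_not_mem _ _ h]
    simp [hne]
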